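-- pv_equiv track=rewrite | github.com/nischay-18/ICM-Research-Tasks---2 | data_loader.py | find_binary_indices
-- ===== SOURCE A (Python) =====
-- from typing import List, Dict, Optional, Tuple
--
-- def find_binary_indices(options: List[str]) -> Tuple[List[int], List[int]]:
--     """
--     Find indices of positive and negative options for binary classification.
--
--     This handles multiple formats:
--     - Agree/Disagree
--     - Yes/No
--     - Support/Oppose
--     - Favor/Against
--     - Approve/Disapprove
--
--     Returns:
--         (positive_indices, negative_indices)
--         Example: ([0, 1], [2, 3]) for ['Strongly Agree', 'Agree', 'Disagree', 'Strongly Disagree']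
--     """
--     options_lower = [str(opt).lower().strip() for opt in options]
--
--     positive_indices = []
--     negative_indices = []
--
--     # Pattern 1: Agree/Disagree
--     for i, opt in enumerate(options_lower):
--         if 'agree' in opt and 'disagree' not in opt:
--             positive_indices.append(i)
--         elif 'disagree' in opt:
--             negative_indices.append(i)
--
--     if positive_indices and negative_indices:
--         return (positive_indices, negative_indices)
--
--     # Pattern 2: Yes/No
--     positive_indices = []
--     negative_indices = []
--     for i, opt in enumerate(options_lower):
--         if opt == 'yes' or opt.startswith('yes,') or opt.startswith('yes '):
--             positive_indices.append(i)
--         elif opt == 'no' or opt.startswith('no,') or opt.startswith('no '):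
--             negative_indices.append(i)
--
--     if positive_indices and negative_indices:
--         return (positive_indices, negative_indices)
--
--     # Pattern 3: Support/Oppose
--     positive_indices = []
--     negative_indices = []
--     for i, opt in enumerate(options_lower):
--         if 'support' in opt and 'oppose' not in opt:
--             positive_indices.append(i)
--         elif 'oppose' in opt:
--             negative_indices.append(i)
--
--     if positive_indices and negative_indices:
--         return (positive_indices, negative_indices)
--
--     # Pattern 4: Favor/Against
--     positive_indices = []
--     negative_indices = []
--     for i, opt in enumerate(options_lower):
--         if 'favor' in opt and 'against' not in opt:
--             positive_indices.append(i)
--         elif 'against' in opt: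
--             negative_indices.append(i)
--
--     if positive_indices and negative_indices:
--         return (positive_indices, negative_indices)
--
--     # Pattern 5: Approve/Disapprove
--     positive_indices = []
--     negative_indices = []
--     for i, opt in enumerate(options_lower):
--         if 'approve' in opt and 'disapprove' not in opt:
--             positive_indices.append(i)
--         elif 'disapprove' in opt:
--             negative_indices.append(i)
--
--     if positive_indices and negative_indices:
--         return (positive_indices, negative_indices)
--
--     # No binary pattern found
--     return ([], [])
-- ===== SOURCE B (Python) =====
-- from typing import List, Tuple
--
-- def _sub_code(opt, pos_word, neg_word):
--     """+1 / -1 / 0 classification by substring pair (positive checked first)."""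
--     if pos_word in opt and neg_word not in opt:
--         return 1
--     if neg_word in opt:
--         return -1
--     return 0
--
-- def _yesno_code(opt):
--     if opt == 'yes' or opt.startswith('yes,') or opt.startswith('yes '):
--         return 1
--     if opt == 'no' or opt.startswith('no,') or opt.startswith('no '):
--         return -1
--     return 0
--
-- def find_binary_indices(options: List[str]) -> Tuple[List[int], List[int]]:
--     """Single pass over the data: classify each option once against all five
--     patterns, accumulating five (pos, neg) buckets; then return the first
--     bucket (in priority order) with both classes present."""
--     buckets = [([], []) for _ in range(5)]
--     for i, raw in enumerate(options):
--         opt = str(raw).lower().strip()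
--         codes = (_sub_code(opt, 'agree', 'disagree'),
--                  _yesno_code(opt),
--                  _sub_code(opt, 'support', 'oppose'),
--                  _sub_code(opt, 'favor', 'against'),
--                  _sub_code(opt, 'approve', 'disapprove'))
--         for bucket, code in zip(buckets, codes):
--             if code == 1:
--                 bucket[0].append(i)
--             elif code == -1:
--                 bucket[1].append(i)
--     for pos, neg in buckets:
--         if pos and neg:
--             return (pos, neg)
--     return ([], [])
-- ===== Notes on version B (the rewrite author's own statement) =====
-- stated objective: alternative
-- what changed: One single pass over the options classifying each option once against all five patterns into five accumulator buckets, with the priority selection done afterwards, instead of up to five staged full rescans with early return.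
import Mathlib
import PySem

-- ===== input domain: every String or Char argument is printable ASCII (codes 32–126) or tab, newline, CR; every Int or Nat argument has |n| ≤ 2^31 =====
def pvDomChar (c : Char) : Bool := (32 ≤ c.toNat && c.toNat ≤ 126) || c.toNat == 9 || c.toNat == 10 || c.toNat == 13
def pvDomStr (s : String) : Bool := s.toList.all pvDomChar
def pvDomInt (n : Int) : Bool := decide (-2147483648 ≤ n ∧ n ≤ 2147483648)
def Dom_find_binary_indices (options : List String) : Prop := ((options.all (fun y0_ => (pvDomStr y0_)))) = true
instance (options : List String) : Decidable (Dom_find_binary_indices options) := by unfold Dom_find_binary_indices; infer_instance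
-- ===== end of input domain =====

-- B replaces A's up-to-five staged rescans with ONE pass over the options that fills
-- five accumulator buckets at once, selecting the first complete bucket afterwards
-- (objective: alternative; same exact result).

-- ===== PORT A =====
-- literal transliteration: five separate enumerate-loops, each with early return
def find_binary_indices (options : List String) : List Int × List Int :=
  let options_lower := options.map (fun opt => PySem.Str.strip (PySem.Str.lower opt))
  -- Pattern 1: Agree/Disagree
  let r1 := (PySem.List.enumerate options_lower 0).foldl (fun st p =>
      if PySem.Str.isIn "agree" p.2 && !(PySem.Str.isIn "disagree" p.2) then (st.1 ++ [p.1], st.2)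
      else if PySem.Str.isIn "disagree" p.2 then (st.1, st.2 ++ [p.1])
      else st) ([], [])
  if !r1.1.isEmpty && !r1.2.isEmpty then r1 else
  -- Pattern 2: Yes/No
  let r2 := (PySem.List.enumerate options_lower 0).foldl (fun st p =>
      if p.2 == "yes" || PySem.Str.startswith p.2 "yes," || PySem.Str.startswith p.2 "yes " then (st.1 ++ [p.1], st.2)
      else if p.2 == "no" || PySem.Str.startswith p.2 "no," || PySem.Str.startswith p.2 "no " then (st.1, st.2 ++ [p.1])
      else st) ([], [])
  if !r2.1.isEmpty && !r2.2.isEmpty then r2 else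
  -- Pattern 3: Support/Oppose
  let r3 := (PySem.List.enumerate options_lower 0).foldl (fun st p =>
      if PySem.Str.isIn "support" p.2 && !(PySem.Str.isIn "oppose" p.2) then (st.1 ++ [p.1], st.2)
      else if PySem.Str.isIn "oppose" p.2 then (st.1, st.2 ++ [p.1])
      else st) ([], [])
  if !r3.1.isEmpty && !r3.2.isEmpty then r3 else
  -- Pattern 4: Favor/Against
  let r4 := (PySem.List.enumerate options_lower 0).foldl (fun st p =>
      if PySem.Str.isIn "favor" p.2 && !(PySem.Str.isIn "against" p.2) then (st.1 ++ [p.1], st.2)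
      else if PySem.Str.isIn "against" p.2 then (st.1, st.2 ++ [p.1])
      else st) ([], [])
  if !r4.1.isEmpty && !r4.2.isEmpty then r4 else
  -- Pattern 5: Approve/Disapprove
  let r5 := (PySem.List.enumerate options_lower 0).foldl (fun st p =>
      if PySem.Str.isIn "approve" p.2 && !(PySem.Str.isIn "disapprove" p.2) then (st.1 ++ [p.1], st.2)
      else if PySem.Str.isIn "disapprove" p.2 then (st.1, st.2 ++ [p.1])
      else st) ([], [])
  if !r5.1.isEmpty && !r5.2.isEmpty then r5 else
  ([], [])

-- ===== PORT B =====
-- _sub_code: +1 / -1 / 0 classification by substring pair (positive checked first)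
def pvSubCode (opt pw nw : String) : Int :=
  if PySem.Str.isIn pw opt && !(PySem.Str.isIn nw opt) then 1
  else if PySem.Str.isIn nw opt then -1
  else 0

-- _yesno_code
def pvYesNoCode (opt : String) : Int :=
  if opt == "yes" || PySem.Str.startswith opt "yes," || PySem.Str.startswith opt "yes " then 1
  else if opt == "no" || PySem.Str.startswith opt "no," || PySem.Str.startswith opt "no " then -1
  else 0

-- codes tuple of Source B, as the list zipped against the buckets
def pvCodes (opt : String) : List Int :=
  [pvSubCode opt "agree" "disagree", pvYesNoCode opt, pvSubCode opt "support" "oppose",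
   pvSubCode opt "favor" "against", pvSubCode opt "approve" "disapprove"]

-- the body of 'for bucket, code in zip(buckets, codes)'
def pvBump (b : List Int × List Int) (c : Int) (i : Int) : List Int × List Int :=
  if c == 1 then (b.1 ++ [i], b.2)
  else if c == -1 then (b.1, b.2 ++ [i])
  else b

-- one iteration of the single pass: update every bucket with this option's code
def pvStep (st : List (List Int × List Int)) (p : Int × String) : List (List Int × List Int) :=
  List.zipWith (fun b c => pvBump b c p.1) st (pvCodes (PySem.Str.strip (PySem.Str.lower p.2)))

-- final selection loop: first bucket with both classes present
def pvSelect : List (List Int × List Int) → List Int × List Int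
  | [] => ([], [])
  | b :: rest => if !b.1.isEmpty && !b.2.isEmpty then b else pvSelect rest

def find_binary_indices_alt (options : List String) : List Int × List Int :=
  pvSelect ((PySem.List.enumerate options 0).foldl pvStep
    [([], []), ([], []), ([], []), ([], []), ([], [])])

-- ===== PRECONDITION & SPEC =====
def Spec_find_binary_indices (options : List String) (out : List Int × List Int) : Prop := out = find_binary_indices_alt options
instance (options : List String) (out : List Int × List Int) : Decidable (Spec_find_binary_indices options out) := by unfold Spec_find_binary_indices; infer_instance

-- ===== CLAIM (what is proved, stated in full; the proofs are below) =====
def Claim_equal_find_binary_indices : Prop := ∀ (options : List String), Dom_find_binary_indices options → Spec_find_binary_indices options (find_binary_indices options)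

-- ===== LEMMAS AND PROOFS =====

-- the per-bucket step of B equals A's per-pattern step (substring patterns)
theorem pvBump_sub (b : List Int × List Int) (opt : String) (pw nw : String) (i : Int) :
    pvBump b (pvSubCode opt pw nw) i =
      (if PySem.Str.isIn pw opt && !(PySem.Str.isIn nw opt) then (b.1 ++ [i], b.2)
       else if PySem.Str.isIn nw opt then (b.1, b.2 ++ [i]) else b) := by
  unfold pvBump pvSubCode; split_ifs <;> simp_all

-- the per-bucket step of B equals A's per-pattern step (yes/no pattern)
theorem pvBump_yesno (b : List Int × List Int) (opt : String) (i : Int) :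
    pvBump b (pvYesNoCode opt) i =
      (if opt == "yes" || PySem.Str.startswith opt "yes," || PySem.Str.startswith opt "yes " then (b.1 ++ [i], b.2)
       else if opt == "no" || PySem.Str.startswith opt "no," || PySem.Str.startswith opt "no " then (b.1, b.2 ++ [i]) else b) := by
  unfold pvBump pvYesNoCode; split_ifs <;> simp_all

-- the single-pass fold over five buckets equals the five independent per-pattern folds
theorem pvFold_decompose (L : List (Int × String)) (b1 b2 b3 b4 b5 : List Int × List Int) :
    L.foldl pvStep [b1, b2, b3, b4, b5] =
      [L.foldl (fun st p =>
          let opt := PySem.Str.strip (PySem.Str.lower p.2)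
          if PySem.Str.isIn "agree" opt && !(PySem.Str.isIn "disagree" opt) then (st.1 ++ [p.1], st.2)
          else if PySem.Str.isIn "disagree" opt then (st.1, st.2 ++ [p.1]) else st) b1,
       L.foldl (fun st p =>
          let opt := PySem.Str.strip (PySem.Str.lower p.2)
          if opt == "yes" || PySem.Str.startswith opt "yes," || PySem.Str.startswith opt "yes " then (st.1 ++ [p.1], st.2)
          else if opt == "no" || PySem.Str.startswith opt "no," || PySem.Str.startswith opt "no " then (st.1, st.2 ++ [p.1]) else st) b2,
       L.foldl (fun st p =>
          let opt := PySem.Str.strip (PySem.Str.lower p.2)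
          if PySem.Str.isIn "support" opt && !(PySem.Str.isIn "oppose" opt) then (st.1 ++ [p.1], st.2)
          else if PySem.Str.isIn "oppose" opt then (st.1, st.2 ++ [p.1]) else st) b3,
       L.foldl (fun st p =>
          let opt := PySem.Str.strip (PySem.Str.lower p.2)
          if PySem.Str.isIn "favor" opt && !(PySem.Str.isIn "against" opt) then (st.1 ++ [p.1], st.2)
          else if PySem.Str.isIn "against" opt then (st.1, st.2 ++ [p.1]) else st) b4,
       L.foldl (fun st p =>
          let opt := PySem.Str.strip (PySem.Str.lower p.2)
          if PySem.Str.isIn "approve" opt && !(PySem.Str.isIn "disapprove" opt) then (st.1 ++ [p.1], st.2)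
          else if PySem.Str.isIn "disapprove" opt then (st.1, st.2 ++ [p.1]) else st) b5] := by
  induction L generalizing b1 b2 b3 b4 b5 with
  | nil => rfl
  | cons p L ih =>
      simp only [List.foldl_cons]
      rw [show pvStep [b1, b2, b3, b4, b5] p =
        [pvBump b1 (pvSubCode (PySem.Str.strip (PySem.Str.lower p.2)) "agree" "disagree") p.1,
         pvBump b2 (pvYesNoCode (PySem.Str.strip (PySem.Str.lower p.2))) p.1,
         pvBump b3 (pvSubCode (PySem.Str.strip (PySem.Str.lower p.2)) "support" "oppose") p.1,
         pvBump b4 (pvSubCode (PySem.Str.strip (PySem.Str.lower p.2)) "favor" "against") p.1,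
         pvBump b5 (pvSubCode (PySem.Str.strip (PySem.Str.lower p.2)) "approve" "disapprove") p.1] from rfl]
      rw [ih]
      simp only [pvBump_sub, pvBump_yesno]

-- folding a per-pattern step over enumerate of the lowered list equals folding the
-- lowered step over enumerate of the original list (the map moves into the step)
theorem enumerate_map_fold {β : Type} (f : String → String)
    (g : β → Int × String → β) (options : List String) (k : Int) (init : β) :
    (PySem.List.enumerate (options.map f) k).foldl g init =
      (PySem.List.enumerate options k).foldl (fun st p => g st (p.1, f p.2)) init := by
  induction options generalizing k init with
  | nil => rfl
  | cons o rest ih =>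
      simp only [List.map_cons, PySem.List.enumerate, List.foldl_cons]
      exact ih _ _

-- ===== VERDICT (by name: the statement is the Claim_ definition above) =====
theorem find_binary_indices_spec : Claim_equal_find_binary_indices := by
  intro options _
  unfold Spec_find_binary_indices find_binary_indices find_binary_indices_alt
  rw [pvFold_decompose]
  simp only [pvSelect, enumerate_map_fold]
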